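-- pv_equiv track=rewrite | github.com/mmoin3/data-pipeline | src/parsers/base_parser.py | split_row_blocks
-- ===== SOURCE A (Python) =====
-- def split_row_blocks(rows: list[list[str]], start_marker: str) -> list[list[list[str]]]:
--     """Split parsed rows into blocks where first column starts with marker."""
--     blocks = []
--     current_block = []
--     normalized_marker = start_marker.upper()
--
--     for row in rows:
--         first_cell = row[0].upper() if row and row[0] else ""
--         if first_cell.startswith(normalized_marker) and current_block:
--             blocks.append(current_block)
--             current_block = []
--         current_block.append(row)
--
--     if current_block:
--         blocks.append(current_block)
--
--     return blocks
-- ===== SOURCE B (Python) =====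
-- def split_row_blocks(rows: list[list[str]], start_marker: str) -> list[list[list[str]]]:
--     """Split parsed rows into blocks where first column starts with marker."""
--     m = start_marker.upper()
--
--     def is_marker(row):
--         return (row[0].upper() if row and row[0] else "").startswith(m)
--
--     def go(rs):
--         if not rs:
--             return []
--         rest = rs[1:]
--         k = 0
--         while k < len(rest) and not is_marker(rest[k]):
--             k += 1
--         return [[rs[0]] + rest[:k]] + go(rest[k:])
--
--     return go(rows)
-- ===== Notes on version B (the rewrite author's own statement) =====
-- stated objective: alternative
-- what changed: Replaces A's single fold with a blocks/current_block accumulator and final flush by a direct recursion that emits each block front-to-back: take the head row, extend the block with the following non-marker rows (a span), and recurse on the remainder.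
import Mathlib
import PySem

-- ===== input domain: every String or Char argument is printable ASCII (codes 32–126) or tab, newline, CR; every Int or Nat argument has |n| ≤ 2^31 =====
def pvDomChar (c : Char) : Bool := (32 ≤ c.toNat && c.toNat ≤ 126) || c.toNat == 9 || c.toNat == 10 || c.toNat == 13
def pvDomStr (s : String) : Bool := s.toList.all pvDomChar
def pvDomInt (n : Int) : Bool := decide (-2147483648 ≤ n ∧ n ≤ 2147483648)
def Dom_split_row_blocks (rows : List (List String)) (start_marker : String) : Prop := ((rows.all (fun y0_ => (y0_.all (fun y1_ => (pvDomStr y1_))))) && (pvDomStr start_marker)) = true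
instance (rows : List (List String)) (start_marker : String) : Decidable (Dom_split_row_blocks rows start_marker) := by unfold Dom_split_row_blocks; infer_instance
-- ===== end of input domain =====

-- B replaces A's blocks/current_block accumulator fold (with a final flush) by a direct
-- recursion emitting each block front-to-back via a span on the non-marker rows (alternative decomposition).

-- ===== PORT A =====
-- loop body of A's for-loop: first_cell = row[0].upper() if row and row[0] else ""
def pvStepA (nm : String) (st : List (List (List String)) × List (List String)) (row : List String) :
    List (List (List String)) × List (List String) :=
  let first := match row with
    | [] => ""
    | c :: _ => if c = "" then "" else PySem.Str.upper c
  if PySem.Str.startswith first nm && !st.2.isEmpty then (st.1 ++ [st.2], [row])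
  else (st.1, st.2 ++ [row])

def split_row_blocks (rows : List (List String)) (start_marker : String) : List (List (List String)) :=
  let nm := PySem.Str.upper start_marker
  let st := rows.foldl (pvStepA nm) ([], [])
  if !st.2.isEmpty then st.1 ++ [st.2] else st.1

-- ===== PORT B =====
def pvIsMarker (nm : String) (row : List String) : Bool :=
  PySem.Str.startswith
    (match row with
      | [] => ""
      | c :: _ => if c = "" then "" else PySem.Str.upper c) nm

-- go: head row plus the following non-marker rows form a block; recurse on the rest
def pvGo (nm : String) : List (List String) → List (List (List String))
  | [] => []
  | r :: rs =>
      (r :: rs.takeWhile (fun x => !pvIsMarker nm x)) ::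
        pvGo nm (rs.dropWhile (fun x => !pvIsMarker nm x))
termination_by l => l.length
decreasing_by simpa using Nat.lt_succ_of_le (List.length_dropWhile_le _ _)

def split_row_blocks_alt (rows : List (List String)) (start_marker : String) : List (List (List String)) :=
  pvGo (PySem.Str.upper start_marker) rows

-- ===== PRECONDITION & SPEC =====
def Spec_split_row_blocks (rows : List (List String)) (start_marker : String) (out : List (List (List String))) : Prop := out = split_row_blocks_alt rows start_marker
instance (rows : List (List String)) (start_marker : String) (out : List (List (List String))) : Decidable (Spec_split_row_blocks rows start_marker out) := by unfold Spec_split_row_blocks; infer_instance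

-- ===== CLAIM (what is proved, stated in full; the proofs are below) =====
def Claim_equal_split_row_blocks : Prop := ∀ (rows : List (List String)) (start_marker : String), Dom_split_row_blocks rows start_marker → Spec_split_row_blocks rows start_marker (split_row_blocks rows start_marker)

-- ===== LEMMAS AND PROOFS =====

-- A's loop from any state with nonempty current block produces: blocks, then the current
-- block extended by the span of non-markers, then B's blocks of the remainder.
theorem pvKey (nm : String) (rs : List (List String)) :
    ∀ (blocks : List (List (List String))) (cur : List (List String)), cur ≠ [] →
    (let st := rs.foldl (pvStepA nm) (blocks, cur);
      if !st.2.isEmpty then st.1 ++ [st.2] else st.1)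
    = blocks ++ ((cur ++ rs.takeWhile (fun x => !pvIsMarker nm x)) ::
        pvGo nm (rs.dropWhile (fun x => !pvIsMarker nm x))) := by
  induction rs with
  | nil =>
      intro blocks cur hcur
      simp [pvGo, hcur]
  | cons r rs ih =>
      intro blocks cur hcur
      by_cases hm : pvIsMarker nm r = true
      · have hstep : pvStepA nm (blocks, cur) r = (blocks ++ [cur], [r]) := by
          simp [pvStepA, pvIsMarker] at hm ⊢
          simp [hm, hcur]
        simp only [List.foldl_cons, hstep]
        rw [ih (blocks ++ [cur]) [r] (by simp)]
        simp [hm, pvGo, List.takeWhile, List.dropWhile]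
      · have hstep : pvStepA nm (blocks, cur) r = (blocks, cur ++ [r]) := by
          simp [pvStepA, pvIsMarker] at hm ⊢
          simp [hm]
        simp only [List.foldl_cons, hstep]
        rw [ih blocks (cur ++ [r]) (by simp)]
        simp [hm, List.takeWhile, List.dropWhile]

-- ===== VERDICT (by name: the statement is the Claim_ definition above) =====
theorem split_row_blocks_spec : Claim_equal_split_row_blocks := by
  intro rows start_marker _
  unfold Spec_split_row_blocks split_row_blocks split_row_blocks_alt
  cases rows with
  | nil => simp [pvGo]
  | cons r rs =>
      have hstep : pvStepA (PySem.Str.upper start_marker) ([], []) r = ([], [r]) := by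
        simp [pvStepA]
      simp only [List.foldl_cons, hstep]
      rw [pvKey (PySem.Str.upper start_marker) rs [] [r] (by simp)]
      simp [pvGo]
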